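-- pv_equiv track=rewrite | github.com/noTirT/AdventOfCode | 2023/day3/part1.py | get_symbol_locations
-- ===== SOURCE A (Python) =====
-- symbols = "*-$=#/%@&+"
--
-- def get_symbol_locations(input_lines):
--     locations = []
--     for row, line in enumerate(input_lines):
--         for symbol in symbols:
--             index = 0
--             while index < len(line):
--                 temp_ind = line.find(symbol, index)
--                 if temp_ind == -1:
--                     break
--                 locations.append((row, temp_ind))
--                 index = temp_ind + 1
--     return locations
-- ===== SOURCE B (Python) =====
-- symbols = "*-$=#/%@&+"
--
-- def get_symbol_locations(input_lines):
--     locations = []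
--     for row, line in enumerate(input_lines):
--         index = {}
--         for col, ch in enumerate(line):
--             index.setdefault(ch, []).append(col)
--         for symbol in symbols:
--             for col in index.get(symbol, []):
--                 locations.append((row, col))
--     return locations
-- ===== Notes on version B (the rewrite author's own statement) =====
-- stated objective: alternative
-- what changed: B replaces the ten repeated str.find rescans per line with one indexing pass building a dict from character to its ascending column list, then emits (row, col) pairs by draining the dict in symbols order.
import Mathlib
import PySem

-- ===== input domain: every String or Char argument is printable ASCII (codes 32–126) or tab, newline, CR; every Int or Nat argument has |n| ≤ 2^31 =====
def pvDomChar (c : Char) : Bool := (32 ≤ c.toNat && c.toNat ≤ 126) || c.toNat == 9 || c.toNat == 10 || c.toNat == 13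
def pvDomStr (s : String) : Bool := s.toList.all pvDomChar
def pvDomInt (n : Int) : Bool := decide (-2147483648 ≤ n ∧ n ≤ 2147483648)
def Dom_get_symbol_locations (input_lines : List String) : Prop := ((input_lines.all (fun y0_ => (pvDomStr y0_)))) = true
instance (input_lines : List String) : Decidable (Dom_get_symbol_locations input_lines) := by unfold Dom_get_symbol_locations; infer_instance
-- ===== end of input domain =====

-- B builds a per-line char→columns index in a single pass and emits pairs in symbols order, instead of repeated find-rescans per symbol (alternative decomposition, similar measured cost).

-- ===== PORT A =====
def pvSymbols : String := "*-$=#/%@&+"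

-- A's inner 'while index < len(line)' loop of repeated line.find(symbol, index);
-- fuel only makes the recursion total (the index strictly increases each step).
def pvAWhile (l : List Char) (sym : List Char) : Nat → Int → List Int
  | 0, _ => []
  | fuel + 1, index =>
    if index < (l.length : Int) then
      let t := PySem.Chars.findFrom l sym index none
      if t = -1 then []
      else t :: pvAWhile l sym fuel (t + 1)
    else []

def get_symbol_locations (input_lines : List String) : List (Int × Int) :=
  (PySem.List.enumerate input_lines 0).foldl (fun acc p =>
    pvSymbols.toList.foldl (fun acc2 c =>
      acc2 ++ (pvAWhile p.2.toList [c] (p.2.toList.length + 1) 0).map (fun i => (p.1, i))) acc) []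

-- ===== PORT B =====
-- index.setdefault(ch, []).append(col) over enumerate(line)
def pvLineIndex (cs : List Char) : PySem.Dict Char (List Int) :=
  (PySem.List.enumerate cs 0).foldl (fun d p => d.modify p.2 [] (· ++ [p.1])) PySem.Dict.empty

def get_symbol_locations_alt (input_lines : List String) : List (Int × Int) :=
  (PySem.List.enumerate input_lines 0).foldl (fun acc p =>
    let d := pvLineIndex p.2.toList
    pvSymbols.toList.foldl (fun acc2 c =>
      acc2 ++ (d.getD c []).map (fun i => (p.1, i))) acc) []

-- ===== PRECONDITION & SPEC =====
def Spec_get_symbol_locations (input_lines : List String) (out : List (Int × Int)) : Prop := out = get_symbol_locations_alt input_lines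
instance (input_lines : List String) (out : List (Int × Int)) : Decidable (Spec_get_symbol_locations input_lines out) := by unfold Spec_get_symbol_locations; infer_instance

-- ===== CLAIM (what is proved, stated in full; the proofs are below) =====
def Claim_equal_get_symbol_locations : Prop := ∀ (input_lines : List String), Dom_get_symbol_locations input_lines → Spec_get_symbol_locations input_lines (get_symbol_locations input_lines)

-- ===== LEMMAS AND PROOFS =====

-- the common specification: occurrence columns of c in l, ascending, starting label s
def pvOccs (c : Char) : List Char → Int → List Int
  | [], _ => []
  | x :: xs, s => if x == c then s :: pvOccs c xs (s + 1) else pvOccs c xs (s + 1)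

theorem pvOccs_eq_nil_of_not_mem (c : Char) (l : List Char) (s : Int) (h : c ∉ l) :
    pvOccs c l s = [] := by
  induction l generalizing s with
  | nil => rfl
  | cons x xs ih =>
    simp only [List.mem_cons, not_or] at h
    simp [pvOccs, beq_iff_eq, Ne.symm h.1, ih _ h.2]

theorem pv_singleton_prefix_iff (c : Char) (xs : List Char) :
    [c] <+: xs ↔ xs.head? = some c := by
  constructor
  · rintro ⟨t, rfl⟩; rfl
  · intro h
    cases xs with
    | nil => simp at h
    | cons y ys => simp at h; exact ⟨ys, by simp [h]⟩

theorem pv_singleton_infix_iff (c : Char) (xs : List Char) :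
    [c] <:+: xs ↔ c ∈ xs := by
  constructor
  · rintro ⟨s, t, rfl⟩; simp
  · intro h
    obtain ⟨s, t, rfl⟩ := List.append_of_mem h
    exact ⟨s, t, by simp⟩

theorem pvOccs_peel (c : Char) (l : List Char) (n k m : Nat)
    (hn : m - k = n) (hkm : k ≤ m) (hm : m < l.length)
    (hc : l[m]? = some c)
    (hmin : ∀ i, k ≤ i → i < m → l[i]? ≠ some c) :
    pvOccs c (l.drop k) ↑k = ↑m :: pvOccs c (l.drop (m + 1)) (↑m + 1) := by
  induction n generalizing k with
  | zero =>
    have hk : k = m := by omega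
    subst hk
    rw [List.drop_eq_getElem_cons hm]
    rw [List.getElem?_eq_getElem hm] at hc
    simp only [Option.some_inj] at hc
    simp [pvOccs, hc]
  | succ n ih =>
    have hk : k < m := by omega
    have hkl : k < l.length := by omega
    rw [List.drop_eq_getElem_cons hkl]
    have hne : l[k] ≠ c := by
      intro h
      exact hmin k le_rfl hk (by rw [List.getElem?_eq_getElem hkl, h])
    have : pvOccs c (l[k] :: l.drop (k + 1)) ↑k = pvOccs c (l.drop (k + 1)) (↑k + 1) := by
      simp [pvOccs, beq_iff_eq, hne]
    rw [this]
    have hcast : (↑k + 1 : Int) = ↑(k + 1) := by push_cast; ring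
    rw [hcast]
    exact ih (k + 1) (by omega) (by omega) (fun i h1 h2 => hmin i (by omega) h2)

theorem pvAWhile_eq_occs (l : List Char) (c : Char) (fuel k : Nat)
    (hk : k ≤ l.length) (hfuel : l.length + 1 - k ≤ fuel) :
    pvAWhile l [c] fuel ↑k = pvOccs c (l.drop k) ↑k := by
  induction fuel generalizing k with
  | zero => omega
  | succ fuel ih =>
    by_cases hlt : k < l.length
    · rw [pvAWhile]
      rw [if_pos (by exact_mod_cast hlt)]
      by_cases ht : PySem.Chars.findFrom l [c] ↑k none = -1
      · rw [if_pos ht]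
        have hnin : ¬ [c] <:+: l.drop k :=
          (PySem.Chars.findFrom_natCast_eq_neg_one_iff l [c] k hk).mp ht
        rw [pvOccs_eq_nil_of_not_mem c _ _ (fun h => hnin ((pv_singleton_infix_iff c _).mpr h))]
      · rw [if_neg ht]
        obtain ⟨hge, hpre, hminp⟩ := PySem.Chars.findFrom_natCast_spec l [c] k hk ht
        set t := PySem.Chars.findFrom l [c] ↑k none with hteq
        have ht0 : 0 ≤ t := le_trans (by exact_mod_cast Nat.zero_le k) hge
        have hhead : l[t.toNat]? = some c := by
          have := (pv_singleton_prefix_iff c _).mp hpre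
          rwa [List.head?_drop] at this
        have htlen : t.toNat < l.length := by
          by_contra h
          rw [List.getElem?_eq_none (by omega)] at hhead
          simp at hhead
        have hkt : k ≤ t.toNat := by omega
        have hmin' : ∀ i, k ≤ i → i < t.toNat → l[i]? ≠ some c := by
          intro i h1 h2 hci
          apply hminp i h1 h2
          rw [pv_singleton_prefix_iff, List.head?_drop]
          exact hci
        have hrec : pvAWhile l [c] fuel (t + 1) = pvOccs c (l.drop (t.toNat + 1)) ↑(t.toNat + 1) := by
          have h1 : (t + 1 : Int) = ↑(t.toNat + 1) := by omega
          rw [h1]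
          exact ih (t.toNat + 1) (by omega) (by omega)
        rw [hrec, pvOccs_peel c l (t.toNat - k) k t.toNat rfl hkt htlen hhead hmin']
        have h2 : (↑t.toNat : Int) = t := by omega
        push_cast
        rw [h2]
    · have hk' : k = l.length := by omega
      rw [pvAWhile, if_neg (by exact_mod_cast Nat.not_lt.mpr (le_of_eq hk'.symm))]
      rw [hk', List.drop_length]
      rfl

theorem pv_enum_filter (c : Char) (cs : List Char) : ∀ (s : Int),
    (((PySem.List.enumerate cs s).filter (fun p => p.2 == c)).map (fun p => p.1)) = pvOccs c cs s := by
  induction cs with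
  | nil => intro s; simp [PySem.List.enumerate_nil, pvOccs]
  | cons x xs ih =>
    intro s
    rw [PySem.List.enumerate_cons]
    by_cases hx : x == c
    · simp [hx, pvOccs, ih (s + 1)]
    · simp [hx, pvOccs, ih (s + 1)]

theorem pvLineIndex_getD (cs : List Char) (c : Char) :
    (pvLineIndex cs).getD c [] = pvOccs c cs 0 := by
  unfold pvLineIndex
  have hswap : (PySem.List.enumerate cs 0).foldl (fun d p => d.modify p.2 [] (· ++ [p.1])) PySem.Dict.empty
      = ((PySem.List.enumerate cs 0).map (fun p => (p.2, p.1))).foldl (fun d p => d.modify p.1 [] (· ++ [p.2])) PySem.Dict.empty := by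
    rw [List.foldl_map]
  rw [hswap, PySem.Dict.getD_foldl_modify_append, PySem.Dict.getD_empty, List.nil_append,
    List.filter_map, List.map_map]
  simpa [Function.comp] using pv_enum_filter c cs 0

theorem pv_line_eq (line : String) (c : Char) :
    pvAWhile line.toList [c] (line.toList.length + 1) 0 = (pvLineIndex line.toList).getD c [] := by
  rw [pvLineIndex_getD]
  have := pvAWhile_eq_occs line.toList c (line.toList.length + 1) 0 (Nat.zero_le _) (by omega)
  simpa using this

-- ===== VERDICT (by name: the statement is the Claim_ definition above) =====
theorem get_symbol_locations_spec : Claim_equal_get_symbol_locations := by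
  intro input_lines _
  unfold Spec_get_symbol_locations get_symbol_locations get_symbol_locations_alt
  apply PySem.List.foldl_congr_mem
  intro acc p _
  apply PySem.List.foldl_congr_mem
  intro acc2 c _
  rw [pv_line_eq p.2 c]
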